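-- pv_equiv track=rewrite | github.com/Brandon-Valley/white_paper_art | tools.py | get_color_cords
-- ===== SOURCE A (Python) =====
-- def get_color_cords(color_matrix):
--     c_cords = {}
--     for line_num in range(len(color_matrix)):
--         line = color_matrix[line_num]
--         for color_num in range(len(line)):
--             color = line[color_num]
--             #to add something for whitespace put something like if not whitespace here!!!!!!!
--
--             #check if this color is already a key in highlight_cords
--             color_known = False
--             for known_color, cord_list in c_cords.items():
--                 if color == known_color:
--                     color_known = True
--                     break
--             #add color to keys in c_cords if new
--             if color_known == False:
--                 c_cords[color] = []
--             #add cord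
--             c_cords[color].append( [line_num, color_num] )
--     return c_cords
-- ===== SOURCE B (Python) =====
-- def get_color_cords(color_matrix):
--     cells = [(x, [i, j])
--              for i, row in enumerate(color_matrix)
--              for j, x in enumerate(row)]
--     colors = dict.fromkeys(x for x, _ in cells)
--     return {c: [ij for x, ij in cells if x == c] for c in colors}
-- ===== Notes on version B (the rewrite author's own statement) =====
-- stated objective: alternative
-- what changed: Replaces A's single accumulating pass with linear dict-membership scan per cell by an index-first scheme: flatten the matrix once into a (color, coordinate) cell list, compute the distinct colors in first-appearance order, then build each color's value by one filter pass over the cell list.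
import Mathlib
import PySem

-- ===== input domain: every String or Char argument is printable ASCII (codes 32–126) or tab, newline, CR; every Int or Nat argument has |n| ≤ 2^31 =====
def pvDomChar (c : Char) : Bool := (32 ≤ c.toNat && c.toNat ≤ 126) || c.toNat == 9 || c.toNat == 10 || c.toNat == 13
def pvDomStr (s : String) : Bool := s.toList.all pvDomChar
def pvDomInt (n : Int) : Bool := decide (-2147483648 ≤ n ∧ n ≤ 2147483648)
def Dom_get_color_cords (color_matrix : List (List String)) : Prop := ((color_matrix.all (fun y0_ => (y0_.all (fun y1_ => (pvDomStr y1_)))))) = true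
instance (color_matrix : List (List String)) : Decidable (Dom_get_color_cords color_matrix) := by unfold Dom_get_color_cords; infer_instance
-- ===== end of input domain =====

-- B replaces A's single accumulating pass over the cells with an index-first scheme:
-- the distinct colors (first-appearance order) are computed first, then one full
-- row-major scan of the matrix per color collects its coordinates (alternative, same cost).

-- ===== PORT A =====
-- c_cords[color].append([line_num, color_num]): append to the first entry of color
def gccAppend : List (String × List (List Int)) → String → List Int → List (String × List (List Int))
  | [], _, _ => []
  | (k, l) :: rest, c, ij => if k == c then (k, l ++ [ij]) :: rest else (k, l) :: gccAppend rest c ij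

def get_color_cords (color_matrix : List (List String)) : List (String × List (List Int)) :=
  (PySem.List.enumerate color_matrix).foldl (fun d p =>
    (PySem.List.enumerate p.2).foldl (fun d q =>
      -- inner scan of c_cords.items() looking for the color, then insert-if-new, then append
      let d := if d.any (fun kv => kv.1 == q.2) then d else d ++ [(q.2, [])]
      gccAppend d q.2 [p.1, q.1]) d) []

-- ===== PORT B =====
def get_color_cords_alt (color_matrix : List (List String)) : List (String × List (List Int)) :=
  let cells := (PySem.List.enumerate color_matrix).flatMap (fun p =>
    (PySem.List.enumerate p.2).map (fun q => (q.2, [p.1, q.1])))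
  let colors := PySem.List.dedup (cells.map Prod.fst)
  colors.map (fun c => (c, (cells.filter (fun x => x.1 == c)).map Prod.snd))

-- ===== PRECONDITION & SPEC =====
def Spec_get_color_cords (color_matrix : List (List String)) (out : List (String × List (List Int))) : Prop := out = get_color_cords_alt color_matrix
instance (color_matrix : List (List String)) (out : List (String × List (List Int))) : Decidable (Spec_get_color_cords color_matrix out) := by unfold Spec_get_color_cords; infer_instance

-- ===== CLAIM (what is proved, stated in full; the proofs are below) =====
def Claim_equal_get_color_cords : Prop := ∀ (color_matrix : List (List String)), Dom_get_color_cords color_matrix → Spec_get_color_cords color_matrix (get_color_cords color_matrix)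

-- ===== LEMMAS AND PROOFS =====

-- the row-major cell stream: (color, [i, j]) for every cell
def gccCells (color_matrix : List (List String)) : List (String × List Int) :=
  (PySem.List.enumerate color_matrix).flatMap (fun p =>
    (PySem.List.enumerate p.2).map (fun q => (q.2, [p.1, q.1])))

-- A's per-cell step
def gccStep (d : List (String × List (List Int))) (x : String × List Int) : List (String × List (List Int)) :=
  let d := if d.any (fun kv => kv.1 == x.1) then d else d ++ [(x.1, [])]
  gccAppend d x.1 x.2

-- B's shape of the answer, as a function of the cell stream
def gccGroup (cells : List (String × List Int)) : List (String × List (List Int)) :=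
  (PySem.List.dedup (cells.map Prod.fst)).map (fun c => (c, (cells.filter (fun p => p.1 == c)).map Prod.snd))

theorem foldl_flatMap' {α β σ : Type} (g : α → List β) (f : σ → β → σ) (l : List α) (init : σ) :
    (l.flatMap g).foldl f init = l.foldl (fun s x => (g x).foldl f s) init := by
  induction l generalizing init with
  | nil => rfl
  | cons a l ih => simp [List.flatMap_cons, List.foldl_append, ih]

theorem gccA_eq_fold (m : List (List String)) :
    get_color_cords m = (gccCells m).foldl gccStep [] := by
  unfold get_color_cords gccCells
  rw [foldl_flatMap']
  simp [List.foldl_map, gccStep]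

theorem gccB_eq_group (m : List (List String)) :
    get_color_cords_alt m = gccGroup (gccCells m) := rfl

theorem gcc_dedup_append_singleton (l : List String) (a : String) :
    PySem.List.dedup (l ++ [a]) =
      if a ∈ l then PySem.List.dedup l else PySem.List.dedup l ++ [a] := by
  simp only [PySem.List.dedup_eq_ofList, PySem.Set.ofList_eq_foldl, List.foldl_append,
    List.foldl_cons, List.foldl_nil]
  have hmem : PySem.Set.contains (List.foldl PySem.Set.add [] l) a = decide (a ∈ l) := by
    rw [← PySem.Set.ofList_eq_foldl]
    simp [PySem.Set.mem_ofList]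
  simp only [PySem.Set.add, hmem]
  split <;> simp_all

-- appending a coordinate to a dict whose keys are nodup and contain c
theorem gccAppend_map {keys : List String} (hnd : keys.Nodup) (g : String → List (List Int))
    (c : String) (hc : c ∈ keys) (v : List Int) :
    gccAppend (keys.map (fun k => (k, g k))) c v =
      keys.map (fun k => (k, if k = c then g k ++ [v] else g k)) := by
  induction keys with
  | nil => cases hc
  | cons k ks ih =>
    simp only [List.map_cons, gccAppend]
    rcases List.nodup_cons.mp hnd with ⟨hk, hks⟩
    by_cases hkc : k = c
    · subst hkc
      simp only [BEq.rfl, if_true, List.cons.injEq, true_and]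
      apply List.map_congr_left
      intro x hx
      have hxk : x ≠ k := fun h => hk (h ▸ hx)
      simp [hxk]
    · have hc' : c ∈ ks := by cases hc with | head => exact absurd rfl hkc | tail _ h => exact h
      simp only [beq_iff_eq, hkc, if_false, ih hks hc']

-- appending a coordinate to the freshly created last entry
theorem gccAppend_last (l : List (String × List (List Int))) (c : String) (v : List Int)
    (h : ∀ p ∈ l, p.1 ≠ c) :
    gccAppend (l ++ [(c, [])]) c v = l ++ [(c, [v])] := by
  induction l with
  | nil => simp [gccAppend]
  | cons p l ih =>
    obtain ⟨k, w⟩ := p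
    have hk : k ≠ c := h (k, w) List.mem_cons_self
    simp only [List.cons_append, gccAppend, beq_iff_eq, hk, if_false]
    rw [ih (fun q hq => h q (List.mem_cons_of_mem _ hq))]

theorem gcc_filter_eq_nil (cells : List (String × List Int)) (c : String)
    (h : c ∉ cells.map Prod.fst) :
    cells.filter (fun p => p.1 == c) = [] := by
  rw [List.filter_eq_nil_iff]
  intro p hp hpc
  exact h (List.mem_map.mpr ⟨p, hp, by simpa using hpc⟩)

theorem gccFold_eq_group (cells : List (String × List Int)) :
    cells.foldl gccStep [] = gccGroup cells := by
  induction cells using List.reverseRecOn with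
  | nil => rfl
  | append_singleton cells x ih =>
    rw [List.foldl_append, List.foldl_cons, List.foldl_nil, ih]
    obtain ⟨c, v⟩ := x
    unfold gccGroup gccStep
    simp only [List.map_append, List.map_cons, List.map_nil]
    rw [gcc_dedup_append_singleton]
    have hany : ((PySem.List.dedup (cells.map Prod.fst)).map
        (fun c' => (c', (cells.filter (fun p => p.1 == c')).map Prod.snd))).any
        (fun kv => kv.1 == c) = decide (c ∈ cells.map Prod.fst) := by
      rw [Bool.eq_iff_iff]
      simp only [List.any_eq_true, List.mem_map, beq_iff_eq, decide_eq_true_eq]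
      constructor
      · rintro ⟨kv, ⟨k, hk, rfl⟩, h⟩
        obtain ⟨a, ha, hak⟩ := List.mem_map.mp ((PySem.List.mem_dedup _ _).mp hk)
        exact ⟨a, ha, hak.trans h⟩
      · rintro ⟨a, ha, hac⟩
        exact ⟨(c, (cells.filter (fun p => p.1 == c)).map Prod.snd),
          ⟨c, (PySem.List.mem_dedup _ _).mpr (List.mem_map.mpr ⟨a, ha, hac⟩), rfl⟩, rfl⟩
    by_cases hc : c ∈ cells.map Prod.fst
    · simp only [hc, if_true, hany, decide_true]
      rw [gccAppend_map (PySem.List.nodup_dedup _) _ c ((PySem.List.mem_dedup _ _).mpr hc) v]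
      apply List.map_congr_left
      intro k _
      by_cases hkc : k = c
      · subst hkc
        simp [List.filter_append]
      · simp [List.filter_append, hkc, Ne.symm hkc]
    · simp only [hc, if_false, hany, decide_false, Bool.false_eq_true]
      rw [gccAppend_last]
      · have hcong : ∀ k ∈ PySem.List.dedup (cells.map Prod.fst),
            ((fun c' => (c', (cells.filter (fun p => p.1 == c')).map Prod.snd)) k) =
            ((fun c' => (c', ((cells ++ [(c, v)]).filter (fun p => p.1 == c')).map Prod.snd)) k) := by
          intro k hk
          have hkc : k ≠ c := fun h => hc (h ▸ (PySem.List.mem_dedup _ _).mp hk)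
          simp [List.filter_append, Ne.symm hkc]
        rw [List.map_congr_left hcong]
        simp [List.filter_append, gcc_filter_eq_nil cells c hc]
      · rintro ⟨k, w⟩ hkw
        obtain ⟨k', hk', heq⟩ := List.mem_map.mp hkw
        intro hkc
        have hk'k : k' = k := congrArg Prod.fst heq
        exact hc ((hk'k.trans hkc) ▸ (PySem.List.mem_dedup _ _).mp hk')

-- ===== VERDICT (by name: the statement is the Claim_ definition above) =====
theorem get_color_cords_spec : Claim_equal_get_color_cords := by
  intro m _
  unfold Spec_get_color_cords
  rw [gccA_eq_fold, gccB_eq_group, gccFold_eq_group]
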